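-- pv_equiv track=rewrite | github.com/Heraldk/adventOfCod2021 | day03.py | count_bit_freq
-- ===== SOURCE A (Python) =====
-- from typing import List, Tuple
--
-- def count_bit_freq(bin_numbers: List[int]) -> Tuple[int, int]:
--     counts = {}
--     for number in bin_numbers:
--         index = 0
--         while number > 0:
--             if number & 1:
--                 counts[index] = counts.get(index, 0) + 1
--             index += 1
--             number >>= 1
--
--     most_freq_number = 0
--     least_freq_number = 0
--     for index in sorted(counts, reverse=True):
--         most_freq_number <<= 1
--         least_freq_number <<= 1
--         if counts[index] * 2 >= len(bin_numbers):
--             most_freq_number |= 1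
--         elif counts[index] * 2 < len(bin_numbers):
--             least_freq_number |= 1
--
--     return most_freq_number, least_freq_number
-- ===== SOURCE B (Python) =====
-- from typing import List, Tuple
--
-- def count_bit_freq(bin_numbers: List[int]) -> Tuple[int, int]:
--     # Per-column scan driven by an OR-mask: the set bits of `combined` are
--     # exactly the columns that occur in the data (negatives and zero have no
--     # finite binary column pattern and are not tallied).
--     positives = [num for num in bin_numbers if num > 0]
--     combined = 0
--     for num in positives:
--         combined |= num
--     most = 0
--     least = 0
--     for p in range(combined.bit_length() - 1, -1, -1):
--         if combined >> p & 1: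
--             ones = sum(num >> p & 1 for num in positives)
--             most *= 2
--             least *= 2
--             if 2 * ones >= len(bin_numbers):
--                 most += 1
--             else:
--                 least += 1
--     return most, least
-- ===== Notes on version B (the rewrite author's own statement) =====
-- stated objective: alternative
-- what changed: Replaces A's per-number bit-count dictionary plus reverse-sorted key fold by an OR-mask column scan: B ORs the positive numbers once, then walks the mask's bit positions from highest to lowest, counting the ones per column on the fly, so no dict and no sort are built.
import Mathlib
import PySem

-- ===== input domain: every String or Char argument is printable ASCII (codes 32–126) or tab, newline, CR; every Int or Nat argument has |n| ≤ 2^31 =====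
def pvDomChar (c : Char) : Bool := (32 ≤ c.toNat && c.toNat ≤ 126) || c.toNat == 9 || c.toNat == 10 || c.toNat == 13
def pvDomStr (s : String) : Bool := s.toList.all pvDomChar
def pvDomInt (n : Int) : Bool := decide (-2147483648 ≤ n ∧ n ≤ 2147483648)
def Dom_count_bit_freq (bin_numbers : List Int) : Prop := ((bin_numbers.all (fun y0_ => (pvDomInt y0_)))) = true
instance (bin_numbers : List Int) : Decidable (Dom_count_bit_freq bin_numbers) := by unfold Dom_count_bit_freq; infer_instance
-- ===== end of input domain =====

-- B replaces A's per-number bit-count dictionary + reverse-sorted key fold by an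
-- OR-mask column scan from the highest to the lowest set position (objective: alternative).

-- ===== PORT A =====
-- inner 'while number > 0' loop of A
def pvBitsLoop (d : PySem.Dict Int Int) (number : Int) (index : Int) : PySem.Dict Int Int :=
  if h : 0 < number then
    pvBitsLoop
      (if PySem.Int.band number 1 ≠ 0 then d.insert index (d.getD index 0 + 1) else d)
      (number >>> (1 : Nat)) (index + 1)
  else d
termination_by number.toNat
decreasing_by
  have hs : number >>> (1 : Nat) = number / 2 := by
    simpa using Int.shiftRight_eq_div_pow number 1
  rw [hs]; omega

-- the 'counts' dict after the first for-loop
def pvCounts (xs : List Int) : PySem.Dict Int Int :=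
  xs.foldl (fun d number => pvBitsLoop d number 0) PySem.Dict.empty

-- body of A's second for-loop; counts[index] is only read for index ∈ counts, so getD is exact
def pvBodyA (xs : List Int) (ml : Int × Int) (index : Int) : Int × Int :=
  if (pvCounts xs).getD index 0 * 2 ≥ (xs.length : Int) then
    (PySem.Int.bor (ml.1 <<< (1 : Nat)) 1, ml.2 <<< (1 : Nat))
  else if (pvCounts xs).getD index 0 * 2 < (xs.length : Int) then
    (ml.1 <<< (1 : Nat), PySem.Int.bor (ml.2 <<< (1 : Nat)) 1)
  else (ml.1 <<< (1 : Nat), ml.2 <<< (1 : Nat))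

def count_bit_freq (bin_numbers : List Int) : Int × Int :=
  (PySem.List.sorted (pvCounts bin_numbers).keys (fun x => x) true).foldl
    (pvBodyA bin_numbers) (0, 0)

-- ===== PORT B =====
-- positives = [num for num in bin_numbers if num > 0]
def pvPos (xs : List Int) : List Int := xs.filter (fun num => decide (0 < num))

-- combined |= num over positives
def pvCombined (xs : List Int) : Int :=
  (pvPos xs).foldl (fun combined num => PySem.Int.bor combined num) 0

-- ones = sum(num >> p & 1 for num in positives)
def pvOnes (positives : List Int) (p : Int) : Int :=
  (positives.map (fun (num : Int) => PySem.Int.band (num >>> p.toNat) 1)).sum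

-- the test 'combined >> p & 1' of B's loop
def pvHasCol (xs : List Int) (p : Int) : Bool :=
  decide (PySem.Int.band (pvCombined xs >>> p.toNat) 1 ≠ 0)

-- body of B's for-loop over the descending range; state = (most, least)
def pvBodyB (xs : List Int) (s : Int × Int) (p : Int) : Int × Int :=
  if pvHasCol xs p then
    if 2 * pvOnes (pvPos xs) p ≥ (xs.length : Int) then (s.1 * 2 + 1, s.2 * 2)
    else (s.1 * 2, s.2 * 2 + 1)
  else s

def count_bit_freq_alt (bin_numbers : List Int) : Int × Int :=
  (PySem.List.pyRange (((PySem.Int.bitLength (pvCombined bin_numbers) : Nat) : Int) - 1) (-1) (-1)).foldl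
    (pvBodyB bin_numbers) (0, 0)

-- ===== PRECONDITION & SPEC =====
def Spec_count_bit_freq (bin_numbers : List Int) (out : Int × Int) : Prop := out = count_bit_freq_alt bin_numbers
instance (bin_numbers : List Int) (out : Int × Int) : Decidable (Spec_count_bit_freq bin_numbers out) := by unfold Spec_count_bit_freq; infer_instance

-- ===== CLAIM (what is proved, stated in full; the proofs are below) =====
def Claim_equal_count_bit_freq : Prop := ∀ (bin_numbers : List Int), Dom_count_bit_freq bin_numbers → Spec_count_bit_freq bin_numbers (count_bit_freq bin_numbers)

-- ===== LEMMAS AND PROOFS =====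

-- number of elements with bit q set (positives only)
def pvCnt (xs : List Int) (q : Int) : Nat :=
  xs.countP (fun (num : Int) => decide (0 < num ∧ PySem.Int.band (num >>> q.toNat) 1 ≠ 0))

-- 'this position goes to most' test
def pvB (xs : List Int) (q : Int) : Bool := decide ((pvCnt xs q : Int) * 2 ≥ (xs.length : Int))

-- canonical MSB-first accumulator step (both loops' bodies, arithmetized)
def pvDown (xs : List Int) (ml : Int × Int) (p : Int) : Int × Int :=
  if pvB xs p then (2 * ml.1 + 1, 2 * ml.2) else (2 * ml.1, 2 * ml.2 + 1)

-- the ascending list of positions some positive element has set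
def pvL (xs : List Int) : List Int :=
  (PySem.List.pyRange 0 ((PySem.Int.bitLength (pvCombined xs) : Nat) : Int) 1).filter
    (pvHasCol xs)

theorem pvShr1 (n : Int) : n >>> (1 : Nat) = n / 2 := by
  simpa using Int.shiftRight_eq_div_pow n 1

theorem pvLorNat (a : Nat) : 2 * a ||| 1 = 2 * a + 1 := by
  apply Nat.eq_of_testBit_eq
  intro i
  cases i with
  | zero => simp [Nat.testBit_zero]
  | succ j =>
      rw [Nat.testBit_succ, Nat.testBit_succ, Nat.or_div_two]
      norm_num [Nat.mul_add_div, Nat.mul_div_cancel_left]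

theorem pvShlTwoMul (m : Int) : m <<< (1 : Nat) = 2 * m := by
  rw [Int.shiftLeft_eq]; ring

theorem pvBorTwoMul (m : Int) (h : 0 ≤ m) : PySem.Int.bor (m <<< (1 : Nat)) 1 = 2 * m + 1 := by
  rw [pvShlTwoMul]
  rw [PySem.Int.bor_of_nonneg (by omega) (by omega)]
  have h2 : (2 * m).toNat = 2 * m.toNat := by omega
  rw [h2]
  show ((2 * m.toNat ||| (1 : Int).toNat : Nat) : Int) = 2 * m + 1
  have h3 : (1 : Int).toNat = 1 := rfl
  rw [h3, pvLorNat]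
  omega

-- the loop reaches the bit only if every intermediate shift stays positive
theorem pvPosOfBit (n : Int) (k : Nat) (hn : 0 < n) (hk : 1 ≤ k)
    (hb : PySem.Int.band (n >>> k) 1 ≠ 0) : 0 < n >>> (1 : Nat) := by
  by_contra hcon
  rw [pvShr1] at hcon
  have hn1 : n = 1 := by omega
  subst hn1
  apply hb
  have hp : (1 : Int) < ((2 ^ k : Nat) : Int) := by
    exact_mod_cast Nat.one_lt_two_pow_iff.mpr (by omega)
  have h0 : (1 : Int) >>> k = 0 := by
    rw [Int.shiftRight_eq_div_pow]
    exact Int.ediv_eq_zero_of_lt (by norm_num) hp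
  rw [h0, PySem.Int.band_comm]
  exact PySem.Int.band_zero 1

theorem pvShiftShift (n : Int) (i q : Int) (hlt : i < q) :
    (n >>> (1 : Nat)) >>> (q - (i + 1)).toNat = n >>> (q - i).toNat := by
  have h1 : (q - i).toNat = 1 + (q - (i + 1)).toNat := by omega
  rw [h1, Int.shiftRight_add]

-- the loop condition one step in ↔ the loop condition now (at a key other than the current index)
theorem pvCondIff (number index q : Int) (h : 0 < number) (hq : q ≠ index) :
    (0 < number >>> (1 : Nat) ∧ index + 1 ≤ q ∧
      PySem.Int.band ((number >>> (1 : Nat)) >>> (q - (index + 1)).toNat) 1 ≠ 0) ↔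
    (0 < number ∧ index ≤ q ∧
      PySem.Int.band (number >>> (q - index).toNat) 1 ≠ 0) := by
  by_cases hlt : index < q
  · rw [pvShiftShift number index q hlt]
    constructor
    · rintro ⟨h1, h2, h3⟩
      have h4 : 2 ≤ number := by rw [pvShr1] at h1; omega
      exact ⟨by omega, by omega, h3⟩
    · rintro ⟨h1, h2, h3⟩
      exact ⟨pvPosOfBit number (q - index).toNat h1 (by omega) h3, by omega, h3⟩
  · constructor
    · rintro ⟨_, h2, _⟩
      exact absurd h2 (by omega)
    · rintro ⟨_, h2, _⟩
      exact absurd h2 (by omega)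

-- value of the counts dict after one number
theorem pvBitsLoop_getD (d : PySem.Dict Int Int) (number index q : Int) :
    (pvBitsLoop d number index).getD q 0 =
      d.getD q 0 +
        (if 0 < number ∧ index ≤ q ∧ PySem.Int.band (number >>> (q - index).toNat) 1 ≠ 0
         then 1 else 0) := by
  induction d, number, index using pvBitsLoop.induct with
  | case1 d number index h ih =>
      by_cases hbit : PySem.Int.band number 1 ≠ 0
      · rw [dif_pos hbit] at ih
        rw [pvBitsLoop, dif_pos h, if_pos hbit, ih, PySem.Dict.getD_insert]
        by_cases hq : q = index
        · subst hq
          rw [if_pos rfl]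
          have hz : (q - q).toNat = 0 := by omega
          rw [if_neg (by rintro ⟨_, h2, _⟩; omega)]
          rw [if_pos ⟨h, le_refl q, by rw [hz, Int.shiftRight_zero]; exact hbit⟩]
          ring
        · rw [if_neg hq, if_congr (pvCondIff number index q h hq) rfl rfl]
      · rw [dif_neg hbit] at ih
        rw [pvBitsLoop, dif_pos h, if_neg hbit, ih]
        by_cases hq : q = index
        · subst hq
          have hz : (q - q).toNat = 0 := by omega
          rw [if_neg (by rintro ⟨_, h2, _⟩; omega)]
          rw [if_neg (by
            rintro ⟨_, _, h3⟩
            rw [hz, Int.shiftRight_zero] at h3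
            exact hbit h3)]
        · rw [if_congr (pvCondIff number index q h hq) rfl rfl]
  | case2 d number index h =>
      rw [pvBitsLoop, dif_neg h, if_neg (by rintro ⟨h1, _, _⟩; exact h h1)]
      ring

theorem pvBitsLoop_mem_keys (d : PySem.Dict Int Int) (number index q : Int) :
    q ∈ (pvBitsLoop d number index).keys ↔
      (0 < number ∧ index ≤ q ∧ PySem.Int.band (number >>> (q - index).toNat) 1 ≠ 0)
        ∨ q ∈ d.keys := by
  induction d, number, index using pvBitsLoop.induct with
  | case1 d number index h ih =>
      by_cases hbit : PySem.Int.band number 1 ≠ 0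
      · rw [dif_pos hbit] at ih
        rw [pvBitsLoop, dif_pos h, if_pos hbit, ih, PySem.Dict.mem_keys_insert]
        by_cases hq : q = index
        · subst hq
          have hz : (q - q).toNat = 0 := by omega
          constructor
          · rintro (⟨_, h2, _⟩ | (h1 | h1))
            · omega
            · exact Or.inl ⟨h, le_refl q, by rw [hz, Int.shiftRight_zero]; exact hbit⟩
            · exact Or.inr h1
          · rintro (_ | h1)
            · exact Or.inr (Or.inl rfl)
            · exact Or.inr (Or.inr h1)
        · rw [pvCondIff number index q h hq]
          constructor
          · rintro (h1 | (h1 | h1))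
            · exact Or.inl h1
            · exact absurd h1 hq
            · exact Or.inr h1
          · rintro (h1 | h1)
            · exact Or.inl h1
            · exact Or.inr (Or.inr h1)
      · rw [dif_neg hbit] at ih
        rw [pvBitsLoop, dif_pos h, if_neg hbit, ih]
        by_cases hq : q = index
        · subst hq
          have hz : (q - q).toNat = 0 := by omega
          constructor
          · rintro (⟨_, h2, _⟩ | h1)
            · omega
            · exact Or.inr h1
          · rintro (⟨_, _, h3⟩ | h1)
            · rw [hz, Int.shiftRight_zero] at h3
              exact absurd h3 hbit
            · exact Or.inr h1
        · rw [pvCondIff number index q h hq]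
  | case2 d number index h =>
      rw [pvBitsLoop, dif_neg h]
      constructor
      · exact fun h1 => Or.inr h1
      · rintro (⟨h1, _, _⟩ | h1)
        · exact absurd h1 h
        · exact h1

theorem pvBitsLoop_nodup (d : PySem.Dict Int Int) (number index : Int) :
    d.keys.Nodup → (pvBitsLoop d number index).keys.Nodup := by
  induction d, number, index using pvBitsLoop.induct with
  | case1 d number index h ih =>
      intro hd
      by_cases hbit : PySem.Int.band number 1 ≠ 0
      · rw [dif_pos hbit] at ih
        rw [pvBitsLoop, dif_pos h, if_pos hbit]
        exact ih (PySem.Dict.nodup_keys_insert _ _ _ hd)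
      · rw [dif_neg hbit] at ih
        rw [pvBitsLoop, dif_pos h, if_neg hbit]
        exact ih hd
  | case2 d number index h =>
      intro hd
      rw [pvBitsLoop, dif_neg h]; exact hd

theorem pvCountsAux (xs : List Int) :
    ∀ (d : PySem.Dict Int Int) (q : Int),
      (xs.foldl (fun d n => pvBitsLoop d n 0) d).getD q 0 =
        d.getD q 0 +
          (xs.countP (fun (num : Int) => decide (0 < num ∧ 0 ≤ q ∧
            PySem.Int.band (num >>> q.toNat) 1 ≠ 0)) : Int) := by
  induction xs with
  | nil => intro d q; simp
  | cons n xs ih =>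
      intro d q
      rw [List.foldl_cons, ih, List.countP_cons]
      rw [pvBitsLoop_getD d n 0 q]
      have hz : (q - 0).toNat = q.toNat := by omega
      rw [hz]
      by_cases hc : (0 < n ∧ 0 ≤ q ∧ PySem.Int.band (n >>> q.toNat) 1 ≠ 0)
      · rw [if_pos ⟨hc.1, hc.2.1, hc.2.2⟩, if_pos (by simpa using hc)]
        push_cast
        ring
      · rw [if_neg (by rintro ⟨h1, h2, h3⟩; exact hc ⟨h1, h2, h3⟩),
            if_neg (by simpa using hc)]
        push_cast
        ring

theorem pvCounts_getD (xs : List Int) (q : Int) :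
    (pvCounts xs).getD q 0 = if 0 ≤ q then (pvCnt xs q : Int) else 0 := by
  unfold pvCounts
  rw [pvCountsAux xs PySem.Dict.empty q, PySem.Dict.getD_empty]
  by_cases hq : 0 ≤ q
  · rw [if_pos hq]
    have hcongr : xs.countP (fun (num : Int) => decide (0 < num ∧ 0 ≤ q ∧
        PySem.Int.band (num >>> q.toNat) 1 ≠ 0)) = pvCnt xs q := by
      unfold pvCnt
      apply List.countP_congr
      intro a _
      simp [hq]
    rw [hcongr, zero_add]
  · rw [if_neg hq]
    have hzero : xs.countP (fun (num : Int) => decide (0 < num ∧ 0 ≤ q ∧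
        PySem.Int.band (num >>> q.toNat) 1 ≠ 0)) = 0 := by
      apply List.countP_eq_zero.mpr
      intro a _
      simp only [decide_eq_true_eq]
      rintro ⟨_, h2, _⟩; exact hq h2
    rw [hzero]
    simp

theorem pvCountsAuxKeys (xs : List Int) :
    ∀ (d : PySem.Dict Int Int) (q : Int),
      q ∈ (xs.foldl (fun d n => pvBitsLoop d n 0) d).keys ↔
        (∃ n ∈ xs, 0 < n ∧ 0 ≤ q ∧ PySem.Int.band (n >>> q.toNat) 1 ≠ 0) ∨ q ∈ d.keys := by
  induction xs with
  | nil => intro d q; simp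
  | cons n xs ih =>
      intro d q
      rw [List.foldl_cons, ih, pvBitsLoop_mem_keys]
      have hz : (q - 0).toNat = q.toNat := by omega
      rw [hz]
      constructor
      · rintro (⟨m, hm, h1⟩ | (⟨h1, h2, h3⟩ | h1))
        · exact Or.inl ⟨m, List.mem_cons_of_mem _ hm, h1⟩
        · exact Or.inl ⟨n, List.mem_cons_self, h1, h2, h3⟩
        · exact Or.inr h1
      · rintro (⟨m, hm, h1⟩ | h1)
        · rcases List.mem_cons.mp hm with hm1 | hm1
          · subst hm1; exact Or.inr (Or.inl ⟨h1.1, h1.2.1, h1.2.2⟩)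
          · exact Or.inl ⟨m, hm1, h1⟩
        · exact Or.inr (Or.inr h1)

theorem pvCounts_mem_keys (xs : List Int) (q : Int) :
    q ∈ (pvCounts xs).keys ↔ 0 ≤ q ∧ pvCnt xs q ≠ 0 := by
  unfold pvCounts
  rw [pvCountsAuxKeys xs PySem.Dict.empty q, PySem.Dict.keys_empty]
  simp only [List.not_mem_nil, or_false]
  constructor
  · rintro ⟨n, hn, h1, h2, h3⟩
    refine ⟨h2, ?_⟩
    unfold pvCnt
    intro h0
    have := List.countP_eq_zero.mp h0 n hn
    simp only [decide_eq_true_eq] at this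
    exact this ⟨h1, h3⟩
  · rintro ⟨hq, hc⟩
    unfold pvCnt at hc
    by_contra hall
    push_neg at hall
    apply hc
    apply List.countP_eq_zero.mpr
    intro a ha
    simp only [decide_eq_true_eq]
    rintro ⟨h1, h3⟩
    exact h3 (hall a ha h1 hq)

theorem pvCounts_nodup (xs : List Int) : (pvCounts xs).keys.Nodup := by
  unfold pvCounts
  have haux : ∀ (d : PySem.Dict Int Int), d.keys.Nodup →
      (xs.foldl (fun d n => pvBitsLoop d n 0) d).keys.Nodup := by
    induction xs with
    | nil => intro d hd; simpa using hd
    | cons n xs ih =>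
        intro d hd
        rw [List.foldl_cons]
        exact ih _ (pvBitsLoop_nodup d n 0 hd)
  apply haux
  rw [PySem.Dict.keys_empty]
  exact List.nodup_nil

-- the combined OR as a natural number
def pvCombN (xs : List Int) : Nat :=
  (pvPos xs).foldl (fun c num => c ||| num.toNat) 0

theorem pvFoldBorAux (l : List Int) (h : ∀ n ∈ l, 0 ≤ n) : ∀ a : Nat,
    l.foldl (fun c n => PySem.Int.bor c n) ((a : Nat) : Int) =
      ((l.foldl (fun c n => c ||| n.toNat) a : Nat) : Int) := by
  induction l with
  | nil => intro a; simp
  | cons n l ih =>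
      intro a
      rw [List.foldl_cons, List.foldl_cons]
      have hn : (0 : Int) ≤ n := h n List.mem_cons_self
      have hstep : PySem.Int.bor ((a : Nat) : Int) n = (((a ||| n.toNat : Nat) : Nat) : Int) := by
        rw [PySem.Int.bor_of_nonneg (by positivity) hn]
        simp
      rw [hstep, ih (fun m hm => h m (List.mem_cons_of_mem _ hm))]

theorem pvCombined_eq (xs : List Int) : pvCombined xs = ((pvCombN xs : Nat) : Int) := by
  have hpos : ∀ n ∈ pvPos xs, 0 ≤ n := by
    intro n hn
    have := (List.mem_filter.mp hn).2
    simp only [decide_eq_true_eq] at this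
    omega
  unfold pvCombined pvCombN
  simpa using pvFoldBorAux (pvPos xs) hpos 0

theorem pvBitLt (num : Int) (k : Nat) (hn : 0 < num)
    (hb : PySem.Int.band (num >>> k) 1 ≠ 0) : k < PySem.Int.bitLength num := by
  have hne : num / ((2 ^ k : Nat) : Int) ≠ 0 := by
    intro h0
    apply hb
    rw [Int.shiftRight_eq_div_pow, h0, PySem.Int.band_comm]
    exact PySem.Int.band_zero 1
  have hle : ((2 ^ k : Nat) : Int) ≤ num := by
    by_contra hcon
    push_neg at hcon
    exact hne (Int.ediv_eq_zero_of_lt (le_of_lt hn) hcon)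
  have h2 := PySem.Int.lt_two_pow_bitLength num
  by_contra hk
  push_neg at hk
  have h3 := Nat.pow_le_pow_right (show 0 < 2 by norm_num) hk
  omega

-- bit-test bridge: for a nonnegative int the Python test 'x >> k & 1' is Nat.testBit
theorem pvBandTestBit (x : Int) (hx : 0 ≤ x) (k : Nat) :
    PySem.Int.band (x >>> k) 1 ≠ 0 ↔ x.toNat.testBit k := by
  rw [show x = ((x.toNat : Nat) : Int) by omega, ← Int.natCast_shiftRight,
      show (1 : Int) = ((1 : Nat) : Int) from rfl, PySem.Int.band_natCast,
      Nat.and_one_is_mod, Nat.testBit_eq_decide_div_mod_eq, ← Nat.shiftRight_eq_div_pow]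
  simp only [Int.toNat_natCast, ne_eq, Nat.cast_eq_zero, decide_eq_true_eq]
  omega

-- bits of the OR = union of bits of the positives
theorem pvFoldOrTestBit (l : List Int) (k : Nat) : ∀ a : Nat,
    (l.foldl (fun c n => c ||| n.toNat) a).testBit k ↔
      a.testBit k ∨ ∃ n ∈ l, n.toNat.testBit k := by
  induction l with
  | nil => intro a; simp
  | cons n l ih =>
      intro a
      rw [List.foldl_cons, ih]
      rw [Nat.testBit_or]
      constructor
      · rintro (h1 | h1)
        · rcases Bool.or_eq_true_iff.mp h1 with h2 | h2
          · exact Or.inl h2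
          · exact Or.inr ⟨n, List.mem_cons_self, h2⟩
        · obtain ⟨m, hm, h2⟩ := h1
          exact Or.inr ⟨m, List.mem_cons_of_mem _ hm, h2⟩
      · rintro (h1 | ⟨m, hm, h2⟩)
        · exact Or.inl (Bool.or_eq_true_iff.mpr (Or.inl h1))
        · rcases List.mem_cons.mp hm with hm1 | hm1
          · subst hm1
            exact Or.inl (Bool.or_eq_true_iff.mpr (Or.inr h2))
          · exact Or.inr ⟨m, hm1, h2⟩

theorem pvCombN_testBit (xs : List Int) (k : Nat) :
    (pvCombN xs).testBit k ↔ ∃ n ∈ xs, 0 < n ∧ PySem.Int.band (n >>> k) 1 ≠ 0 := by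
  unfold pvCombN
  rw [pvFoldOrTestBit]
  simp only [Nat.zero_testBit, Bool.false_eq_true, false_or]
  constructor
  · rintro ⟨n, hn, hb⟩
    obtain ⟨hmem, hpos⟩ := List.mem_filter.mp hn
    simp only [decide_eq_true_eq] at hpos
    exact ⟨n, hmem, hpos, (pvBandTestBit n (by omega) k).mpr hb⟩
  · rintro ⟨n, hn, hpos, hb⟩
    exact ⟨n, List.mem_filter.mpr ⟨hn, by simpa using hpos⟩,
      (pvBandTestBit n (by omega) k).mp hb⟩

-- q ∈ pvL ↔ the column occurs
theorem pvCnt_ne_zero (xs : List Int) (q : Int) :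
    pvCnt xs q ≠ 0 ↔ ∃ n ∈ xs, 0 < n ∧ PySem.Int.band (n >>> q.toNat) 1 ≠ 0 := by
  unfold pvCnt
  constructor
  · intro h
    have := List.countP_pos_iff.mp (Nat.pos_of_ne_zero h)
    simpa using this
  · intro h
    have hpos : 0 < xs.countP (fun (num : Int) => decide (0 < num ∧
        PySem.Int.band (num >>> q.toNat) 1 ≠ 0)) :=
      List.countP_pos_iff.mpr (by simpa using h)
    omega

theorem pvCombined_nonneg (xs : List Int) : 0 ≤ pvCombined xs := by
  rw [pvCombined_eq]; positivity

theorem pvCombined_bit (xs : List Int) (q : Int) :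
    pvHasCol xs q = true ↔ pvCnt xs q ≠ 0 := by
  unfold pvHasCol
  rw [decide_eq_true_iff]
  rw [pvBandTestBit _ (pvCombined_nonneg xs), pvCombined_eq, Int.toNat_natCast,
      pvCombN_testBit, pvCnt_ne_zero]

theorem pvMem_L (xs : List Int) (q : Int) :
    q ∈ pvL xs ↔ 0 ≤ q ∧ pvCnt xs q ≠ 0 := by
  unfold pvL
  rw [List.mem_filter, PySem.List.mem_pyRange_one]
  constructor
  · rintro ⟨⟨h0, _⟩, hc⟩
    exact ⟨h0, (pvCombined_bit xs q).mp hc⟩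
  · rintro ⟨h0, hc⟩
    have hb' := (pvCombined_bit xs q).mpr hc
    unfold pvHasCol at hb'
    rw [decide_eq_true_iff] at hb'
    have hb := hb'
    have hcpos : 0 < pvCombined xs := by
      rcases lt_or_eq_of_le (pvCombined_nonneg xs) with h | h
      · exact h
      · exfalso
        apply hb
        rw [← h]
        have : (0 : Int) >>> q.toNat = 0 := by simp
        rw [this, PySem.Int.band_comm]
        exact PySem.Int.band_zero 1
    have hlt := pvBitLt (pvCombined xs) q.toNat hcpos hb
    refine ⟨⟨h0, by omega⟩, (pvCombined_bit xs q).mpr hc⟩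

theorem pvL_pairwise (xs : List Int) : (pvL xs).Pairwise (· < ·) := by
  unfold pvL
  exact List.Pairwise.sublist (List.filter_sublist) (PySem.List.pairwise_lt_pyRange_one _ _)

theorem pvSorted_keys (xs : List Int) :
    PySem.List.sorted (pvCounts xs).keys (fun x => x) true = (pvL xs).reverse := by
  apply PySem.List.sorted_rev_eq_of_perm_of_pairwise_gt
  · apply List.perm_of_nodup_nodup_toFinset_eq
    · exact List.nodup_reverse.mpr ((pvL_pairwise xs).imp (fun h => ne_of_lt h))
    · exact pvCounts_nodup xs
    · ext q
      simp only [List.mem_toFinset, List.mem_reverse]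
      rw [pvMem_L, pvCounts_mem_keys]
  · rw [List.pairwise_reverse]
    exact (pvL_pairwise xs).imp (fun h => h)

-- the per-column one-count B computes is pvCnt
theorem pvOnes_eq (xs : List Int) (p : Int) : pvOnes (pvPos xs) p = (pvCnt xs p : Int) := by
  unfold pvOnes
  have hmap : (pvPos xs).map (fun (num : Int) => PySem.Int.band (num >>> p.toNat) 1) =
      (pvPos xs).map (fun (num : Int) =>
        if (fun (num : Int) => decide (PySem.Int.band (num >>> p.toNat) 1 ≠ 0)) num = true
        then 1 else 0) := by
    apply List.map_congr_left
    intro n hn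
    have hpos := (List.mem_filter.mp hn).2
    simp only [decide_eq_true_eq] at hpos
    have hband : PySem.Int.band (n >>> p.toNat) 1 = ((n.toNat >>> p.toNat % 2 : Nat) : Int) := by
      rw [show n = ((n.toNat : Nat) : Int) by omega, ← Int.natCast_shiftRight,
          show (1 : Int) = ((1 : Nat) : Int) from rfl, PySem.Int.band_natCast,
          Nat.and_one_is_mod]
      simp only [Int.toNat_natCast]
    show PySem.Int.band (n >>> p.toNat) 1 =
      if decide (PySem.Int.band (n >>> p.toNat) 1 ≠ 0) = true then 1 else 0
    rw [hband]
    split_ifs with h <;> simp only [decide_eq_true_eq, ne_eq, Nat.cast_eq_zero] at h <;> omega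
  rw [hmap, PySem.List.sum_map_ite_one_zero]
  unfold pvCnt pvPos
  rw [List.countP_filter]
  congr 1
  apply List.countP_congr
  intro a _
  simp only [Bool.and_eq_true, decide_eq_true_eq]
  tauto

theorem pvFoldA_conv (xs : List Int) (L : List Int) :
    ∀ m l : Int, 0 ≤ m → 0 ≤ l → (∀ p ∈ L, 0 ≤ p) →
      L.foldl (pvBodyA xs) (m, l) = L.foldl (pvDown xs) (m, l) := by
  induction L with
  | nil => intro m l _ _ _; simp
  | cons p L ih =>
      intro m l hm hl hall
      have hp0 : 0 ≤ p := hall p List.mem_cons_self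
      rw [List.foldl_cons, List.foldl_cons]
      have hv : pvBodyA xs (m, l) p = pvDown xs (m, l) p := by
        unfold pvBodyA pvDown pvB
        simp only [pvCounts_getD xs, hp0, if_true]
        by_cases hb : ((pvCnt xs p : Int) * 2 ≥ (xs.length : Int))
        · rw [if_pos hb, if_pos (by simpa using hb)]
          rw [pvBorTwoMul m hm, pvShlTwoMul]
        · rw [if_neg hb,
              if_pos (show (pvCnt xs p : Int) * 2 < (xs.length : Int) by omega),
              if_neg (by simpa using hb)]
          rw [pvShlTwoMul, pvBorTwoMul l hl]
      rw [hv]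
      rcases hpd : pvDown xs (m, l) p with ⟨m', l'⟩
      have hnn : 0 ≤ m' ∧ 0 ≤ l' := by
        unfold pvDown at hpd
        split_ifs at hpd <;> (simp only [Prod.mk.injEq] at hpd; omega)
      exact ih m' l' hnn.1 hnn.2 (fun r hr => hall r (List.mem_cons_of_mem _ hr))

-- B's fold is the pvDown fold over pvL.reverse
theorem pvAlt_eq (xs : List Int) :
    count_bit_freq_alt xs = (pvL xs).reverse.foldl (pvDown xs) (0, 0) := by
  unfold count_bit_freq_alt
  have hr := PySem.List.pyRange_neg_one_eq_reverse
    (((PySem.Int.bitLength (pvCombined xs) : Nat) : Int) - 1) (-1)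
  rw [show ((-1 : Int) + 1) = 0 from rfl,
      show (((PySem.Int.bitLength (pvCombined xs) : Nat) : Int) - 1) + 1 =
        ((PySem.Int.bitLength (pvCombined xs) : Nat) : Int) by ring] at hr
  rw [hr]
  have hbody : pvBodyB xs = fun (s : Int × Int) (p : Int) =>
      if pvHasCol xs p = true then
        (fun (s : Int × Int) (p : Int) =>
          if 2 * pvOnes (pvPos xs) p ≥ (xs.length : Int) then (s.1 * 2 + 1, s.2 * 2)
          else (s.1 * 2, s.2 * 2 + 1)) s p
      else s := by
    funext s p
    simp only [pvBodyB]
  rw [hbody, PySem.List.foldl_ite_eq_foldl_filter (p := fun p => pvHasCol xs p = true)]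
  simp only [Bool.decide_eq_true]
  rw [List.filter_reverse]
  unfold pvL
  apply PySem.List.foldl_congr_mem
  intro acc p hp
  have hc := ((pvMem_L xs p).mp (List.mem_reverse.mp hp)).2
  rw [pvOnes_eq]
  unfold pvDown pvB
  by_cases hb : ((pvCnt xs p : Int) * 2 ≥ (xs.length : Int))
  · rw [if_pos (by omega), if_pos (by simpa using hb)]
    simp only [Prod.mk.injEq]
    exact ⟨by ring, by ring⟩
  · rw [if_neg (by omega), if_neg (by simpa using hb)]
    simp only [Prod.mk.injEq]
    exact ⟨by ring, by ring⟩

-- ===== VERDICT (by name: the statement is the Claim_ definition above) =====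
theorem count_bit_freq_spec : Claim_equal_count_bit_freq := by
  intro xs _
  unfold Spec_count_bit_freq
  unfold count_bit_freq
  rw [pvSorted_keys]
  rw [pvFoldA_conv xs ((pvL xs).reverse) 0 0 (le_refl 0) (le_refl 0) (by
    intro p hp
    exact ((pvMem_L xs p).mp (List.mem_reverse.mp hp)).1)]
  rw [pvAlt_eq]
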